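-- pv_equiv track=rewrite | github.com/HarryBroadbelt/HackNotts2024 | sounds.py | checkWalls
-- ===== SOURCE A (Python) =====
-- def checkWalls(grid,soundLoc,playerLoc):
--     muffling = 0
--     atPlayer = False
--     while not atPlayer:
--         if abs(soundLoc[0]-playerLoc[0]) > abs(soundLoc[1]-playerLoc[1]):
--             if soundLoc[0]-playerLoc[0] < 0:
--                 if grid[soundLoc[0]+1][soundLoc[1]] == "#":
--                     muffling += 1
--                 soundLoc[0]+=1
--             else:
--                 if grid[soundLoc[0]-1][soundLoc[1]] == "#":
--                     muffling += 1
--                 soundLoc[0]-=1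
--         elif abs(soundLoc[0]-playerLoc[0]) < abs(soundLoc[1]-playerLoc[1]):
--             if soundLoc[1]-playerLoc[1] < 0:
--                 if grid[soundLoc[0]][soundLoc[1]+1] == "#":
--                     muffling += 1
--                 soundLoc[1]+=1
--             else:
--                 if grid[soundLoc[0]][soundLoc[1]-1] == "#":
--                     muffling += 1
--                 soundLoc[1]-=1
--         else:
--             atPlayer = True
--     return muffling
-- ===== SOURCE B (Python) =====
-- def checkWalls(grid, soundLoc, playerLoc):
--     dr = playerLoc[0] - soundLoc[0]
--     dc = playerLoc[1] - soundLoc[1]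
--     if abs(dr) > abs(dc):
--         n = abs(dr) - abs(dc)
--         step = 1 if dr > 0 else -1
--         walls = sum(1 for k in range(1, n + 1)
--                     if grid[soundLoc[0] + k * step][soundLoc[1]] == "#")
--         soundLoc[0] += n * step
--     elif abs(dc) > abs(dr):
--         n = abs(dc) - abs(dr)
--         step = 1 if dc > 0 else -1
--         walls = sum(1 for k in range(1, n + 1)
--                     if grid[soundLoc[0]][soundLoc[1] + k * step] == "#")
--         soundLoc[1] += n * step
--     else:
--         walls = 0
--     return walls
-- ===== Notes on version B (the rewrite author's own statement) =====
-- stated objective: simpler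
-- what changed: A walks one cell at a time in a while loop, re-evaluating the abs-comparison and direction branch every step; B decides the axis and direction once, counts '#' over the single entered segment with one range sum, and moves soundLoc to its final position in one assignment.
import Mathlib
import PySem

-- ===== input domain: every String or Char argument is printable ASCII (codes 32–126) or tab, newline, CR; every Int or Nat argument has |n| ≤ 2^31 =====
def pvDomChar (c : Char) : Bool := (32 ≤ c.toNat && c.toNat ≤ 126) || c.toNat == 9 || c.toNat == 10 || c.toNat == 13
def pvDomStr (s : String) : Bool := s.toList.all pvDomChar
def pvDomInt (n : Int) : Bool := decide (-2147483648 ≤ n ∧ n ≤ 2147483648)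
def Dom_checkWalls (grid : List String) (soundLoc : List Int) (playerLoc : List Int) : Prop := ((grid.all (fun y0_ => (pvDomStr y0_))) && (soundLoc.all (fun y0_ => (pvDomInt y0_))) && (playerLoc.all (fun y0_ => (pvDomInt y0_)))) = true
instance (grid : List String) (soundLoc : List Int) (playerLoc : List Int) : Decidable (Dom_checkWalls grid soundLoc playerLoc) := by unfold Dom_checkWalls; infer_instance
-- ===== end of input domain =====

-- B replaces A's cell-by-cell while loop (re-deciding the axis each step) by choosing the
-- axis/direction once and counting '#' over the single entered segment with one range sum;
-- equivalence proved for the RETURN value (both Pythons also perform the same in-place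
-- mutation of soundLoc, moving it to the final position).

-- grid[i][j] (Python raises on out-of-range; pvCell returns none exactly there)
def pvCell (grid : List String) (i j : Int) : Option Char :=
  (PySem.List.pyGet? grid i).bind (fun row => PySem.Str.pyGet? row j)

-- ===== PORT A =====
-- the while loop of A, state = (soundLoc[0], soundLoc[1], muffling); playerLoc is read-only.
-- fuel = |r-pr| + |c-pc| bounds the number of iterations (each iteration decreases it by 1);
-- the fuel-0 branch is unreachable before the loop's own exit test succeeds.
def checkWallsGo (grid : List String) (fuel : Nat) (r c pr pc muffling : Int) : Int :=
  match fuel with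
  | 0 => muffling
  | fuel + 1 =>
    if (r - pr).natAbs > (c - pc).natAbs then
      if r - pr < 0 then
        checkWallsGo grid fuel (r + 1) c pr pc
          (muffling + (if pvCell grid (r + 1) c = some '#' then 1 else 0))
      else
        checkWallsGo grid fuel (r - 1) c pr pc
          (muffling + (if pvCell grid (r - 1) c = some '#' then 1 else 0))
    else if (r - pr).natAbs < (c - pc).natAbs then
      if c - pc < 0 then
        checkWallsGo grid fuel r (c + 1) pr pc
          (muffling + (if pvCell grid r (c + 1) = some '#' then 1 else 0))
      else
        checkWallsGo grid fuel r (c - 1) pr pc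
          (muffling + (if pvCell grid r (c - 1) = some '#' then 1 else 0))
    else muffling

def checkWallsLoop (grid : List String) (r c pr pc muffling : Int) : Int :=
  checkWallsGo grid ((r - pr).natAbs + (c - pc).natAbs) r c pr pc muffling

def checkWalls (grid : List String) (soundLoc : List Int) (playerLoc : List Int) : Int :=
  checkWallsLoop grid (PySem.List.pyGetD soundLoc 0 0) (PySem.List.pyGetD soundLoc 1 0)
    (PySem.List.pyGetD playerLoc 0 0) (PySem.List.pyGetD playerLoc 1 0) 0

-- ===== PORT B =====
-- core of Source B on the four coordinates: pick the axis once, one range sum over the segment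
def checkWallsCore (grid : List String) (r c pr pc : Int) : Int :=
  let dr := pr - r
  let dc := pc - c
  if dr.natAbs > dc.natAbs then
    let n : Int := (dr.natAbs : Int) - (dc.natAbs : Int)
    let step : Int := if 0 < dr then 1 else -1
    ((PySem.List.pyRange 1 (n + 1) 1).map
      (fun k => if pvCell grid (r + k * step) c = some '#' then (1 : Int) else 0)).sum
  else if dc.natAbs > dr.natAbs then
    let n : Int := (dc.natAbs : Int) - (dr.natAbs : Int)
    let step : Int := if 0 < dc then 1 else -1
    ((PySem.List.pyRange 1 (n + 1) 1).map
      (fun k => if pvCell grid r (c + k * step) = some '#' then (1 : Int) else 0)).sum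
  else 0

def checkWalls_alt (grid : List String) (soundLoc : List Int) (playerLoc : List Int) : Int :=
  checkWallsCore grid (PySem.List.pyGetD soundLoc 0 0) (PySem.List.pyGetD soundLoc 1 0)
    (PySem.List.pyGetD playerLoc 0 0) (PySem.List.pyGetD playerLoc 1 0)

-- ===== PRECONDITION & SPEC =====
-- longest row of the grid (bounds how many consecutive column indices can be valid)
def pvMaxRowLen (grid : List String) : Nat :=
  grid.foldl (fun m s => max m s.toList.length) 0

-- Pre_ = exactly the inputs where Python A returns: both location lists have two entries
-- and every grid cell the walk enters exists (Python indexing, negative = from the end).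
def Pre_checkWalls (grid : List String) (soundLoc : List Int) (playerLoc : List Int) : Prop :=
  2 ≤ soundLoc.length ∧ 2 ≤ playerLoc.length ∧
  (let r := PySem.List.pyGetD soundLoc 0 0
   let c := PySem.List.pyGetD soundLoc 1 0
   let dr := PySem.List.pyGetD playerLoc 0 0 - r
   let dc := PySem.List.pyGetD playerLoc 1 0 - c
   -- the walk enters ||dr|-|dc|| cells; more than 2*len(grid) consecutive row (resp. column
   -- with a ragged bound) indices cannot all be valid Python indices, so the range is clamped
   -- (an equivalent bound that keeps the condition cheap to decide on huge coordinates)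
   (dr.natAbs > dc.natAbs →
     ((dr.natAbs : Int) - (dc.natAbs : Int) ≤ 2 * (grid.length : Int) ∧
      ∀ k ∈ PySem.List.pyRange 1
          (min (((dr.natAbs : Int) - (dc.natAbs : Int)) + 1) (2 * (grid.length : Int) + 1)) 1,
        pvCell grid (r + k * (if 0 < dr then 1 else -1)) c ≠ none)) ∧
   (dc.natAbs > dr.natAbs →
     ((dc.natAbs : Int) - (dr.natAbs : Int) ≤ 2 * (pvMaxRowLen grid : Int) ∧
      ∀ k ∈ PySem.List.pyRange 1
          (min (((dc.natAbs : Int) - (dr.natAbs : Int)) + 1) (2 * (pvMaxRowLen grid : Int) + 1)) 1,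
        pvCell grid r (c + k * (if 0 < dc then 1 else -1)) ≠ none)))

instance (grid : List String) (soundLoc : List Int) (playerLoc : List Int) : Decidable (Pre_checkWalls grid soundLoc playerLoc) := by
  unfold Pre_checkWalls; infer_instance

def pvWitness_checkWalls : List String × List Int × List Int :=
  (["..", "#.", ".."], [0, 0], [2, 0])

def Spec_checkWalls (grid : List String) (soundLoc : List Int) (playerLoc : List Int) (out : Int) : Prop := out = checkWalls_alt grid soundLoc playerLoc
instance (grid : List String) (soundLoc : List Int) (playerLoc : List Int) (out : Int) : Decidable (Spec_checkWalls grid soundLoc playerLoc out) := by unfold Spec_checkWalls; infer_instance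

-- ===== CLAIM (what is proved, stated in full; the proofs are below) =====
def Claim_equal_checkWalls : Prop := ∀ (grid : List String) (soundLoc : List Int) (playerLoc : List Int), Dom_checkWalls grid soundLoc playerLoc → Pre_checkWalls grid soundLoc playerLoc → Spec_checkWalls grid soundLoc playerLoc (checkWalls grid soundLoc playerLoc)

-- ===== LEMMAS AND PROOFS =====

-- peel the first entered cell off a segment sum
lemma sum_seg_shift (f : Int → Int) (r step : Int) (n : Int) (hn : 1 ≤ n) :
    ((PySem.List.pyRange 1 (n + 1) 1).map (fun k => f (r + k * step))).sum
    = f (r + step) + ((PySem.List.pyRange 1 n 1).map (fun k => f ((r + step) + k * step))).sum := by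
  rw [PySem.List.pyRange_one_cons (show (1:Int) < n + 1 by omega)]
  norm_num
  rw [PySem.List.pyRange_one (a := 2) (b := n + 1), PySem.List.pyRange_one (a := 1) (b := n)]
  simp only [List.map_map]
  have hb : (n + 1 - 2) = n - 1 := by ring
  rw [hb]
  congr 1
  apply List.map_congr_left
  intro k _
  have : (2 + (k:Int)) * step = step + (1 + (k:Int)) * step := by ring
  simp [Function.comp, this, add_assoc]

lemma core_eq_zero (grid : List String) (r c pr pc : Int)
    (h : (pr - r).natAbs = (pc - c).natAbs) : checkWallsCore grid r c pr pc = 0 := by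
  simp [checkWallsCore, h]

-- one step of A's loop absorbed into B's closed-form count, four direction cases
lemma core_step_row_up (grid : List String) (r c pr pc : Int)
    (h1 : (pr - r).natAbs > (pc - c).natAbs) (h2 : 0 < pr - r) :
    checkWallsCore grid r c pr pc
    = (if pvCell grid (r + 1) c = some '#' then 1 else 0) + checkWallsCore grid (r + 1) c pr pc := by
  have hn : (1:Int) ≤ ((pr - r).natAbs : Int) - ((pc - c).natAbs : Int) := by omega
  rw [checkWallsCore, checkWallsCore]
  simp only [if_pos h1, if_pos h2]
  rw [sum_seg_shift (fun x => if pvCell grid x c = some '#' then (1:Int) else 0) r 1 _ hn]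
  simp only [mul_one]
  congr 1
  by_cases hc : (pr - (r + 1)).natAbs > (pc - c).natAbs
  · have hd : 0 < pr - (r + 1) := by omega
    simp only [if_pos hc, if_pos hd]
    have hb : ((pr - (r + 1)).natAbs : Int) - ((pc - c).natAbs : Int) + 1
        = ((pr - r).natAbs : Int) - ((pc - c).natAbs : Int) := by omega
    rw [hb]
    simp [add_assoc, mul_one]
  · have he : (pr - (r + 1)).natAbs = (pc - c).natAbs := by omega
    simp only [if_neg hc]
    rw [if_neg (by omega)]
    have hb : ((pr - r).natAbs : Int) - ((pc - c).natAbs : Int) = 1 := by omega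
    rw [hb]
    simp [PySem.List.pyRange_one_eq_nil]

lemma core_step_row_down (grid : List String) (r c pr pc : Int)
    (h1 : (pr - r).natAbs > (pc - c).natAbs) (h2 : pr - r < 0) :
    checkWallsCore grid r c pr pc
    = (if pvCell grid (r - 1) c = some '#' then 1 else 0) + checkWallsCore grid (r - 1) c pr pc := by
  have hn : (1:Int) ≤ ((pr - r).natAbs : Int) - ((pc - c).natAbs : Int) := by omega
  rw [checkWallsCore, checkWallsCore]
  simp only [if_pos h1, if_neg (show ¬ (0 < pr - r) by omega)]
  rw [sum_seg_shift (fun x => if pvCell grid x c = some '#' then (1:Int) else 0) r (-1) _ hn]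
  have hr : r + (-1) = r - 1 := by ring
  rw [hr]
  congr 1
  by_cases hc : (pr - (r - 1)).natAbs > (pc - c).natAbs
  · have hd : ¬ (0 < pr - (r - 1)) := by omega
    simp only [if_pos hc, if_neg hd]
    have hb : ((pr - (r - 1)).natAbs : Int) - ((pc - c).natAbs : Int) + 1
        = ((pr - r).natAbs : Int) - ((pc - c).natAbs : Int) := by omega
    rw [hb]
  · have he : (pr - (r - 1)).natAbs = (pc - c).natAbs := by omega
    simp only [if_neg hc]
    rw [if_neg (by omega)]
    have hb : ((pr - r).natAbs : Int) - ((pc - c).natAbs : Int) = 1 := by omega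
    rw [hb]
    simp [PySem.List.pyRange_one_eq_nil]

lemma core_step_col_up (grid : List String) (r c pr pc : Int)
    (h1 : (pc - c).natAbs > (pr - r).natAbs) (h2 : 0 < pc - c) :
    checkWallsCore grid r c pr pc
    = (if pvCell grid r (c + 1) = some '#' then 1 else 0) + checkWallsCore grid r (c + 1) pr pc := by
  have hn : (1:Int) ≤ ((pc - c).natAbs : Int) - ((pr - r).natAbs : Int) := by omega
  rw [checkWallsCore, checkWallsCore]
  simp only [if_neg (show ¬ ((pr - r).natAbs > (pc - c).natAbs) by omega), if_pos h1, if_pos h2]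
  rw [sum_seg_shift (fun y => if pvCell grid r y = some '#' then (1:Int) else 0) c 1 _ hn]
  simp only [mul_one]
  congr 1
  by_cases hc : (pc - (c + 1)).natAbs > (pr - r).natAbs
  · have hd : 0 < pc - (c + 1) := by omega
    rw [if_neg (show ¬ ((pr - r).natAbs > (pc - (c + 1)).natAbs) by omega)]
    simp only [if_pos hc, if_pos hd]
    have hb : ((pc - (c + 1)).natAbs : Int) - ((pr - r).natAbs : Int) + 1
        = ((pc - c).natAbs : Int) - ((pr - r).natAbs : Int) := by omega
    rw [hb]
    simp [add_assoc, mul_one]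
  · have he : (pc - (c + 1)).natAbs = (pr - r).natAbs := by omega
    rw [if_neg (by omega), if_neg (by omega)]
    have hb : ((pc - c).natAbs : Int) - ((pr - r).natAbs : Int) = 1 := by omega
    rw [hb]
    simp [PySem.List.pyRange_one_eq_nil]

lemma core_step_col_down (grid : List String) (r c pr pc : Int)
    (h1 : (pc - c).natAbs > (pr - r).natAbs) (h2 : pc - c < 0) :
    checkWallsCore grid r c pr pc
    = (if pvCell grid r (c - 1) = some '#' then 1 else 0) + checkWallsCore grid r (c - 1) pr pc := by
  have hn : (1:Int) ≤ ((pc - c).natAbs : Int) - ((pr - r).natAbs : Int) := by omega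
  rw [checkWallsCore, checkWallsCore]
  simp only [if_neg (show ¬ ((pr - r).natAbs > (pc - c).natAbs) by omega), if_pos h1,
    if_neg (show ¬ (0 < pc - c) by omega)]
  rw [sum_seg_shift (fun y => if pvCell grid r y = some '#' then (1:Int) else 0) c (-1) _ hn]
  have hr : c + (-1) = c - 1 := by ring
  rw [hr]
  congr 1
  by_cases hc : (pc - (c - 1)).natAbs > (pr - r).natAbs
  · have hd : ¬ (0 < pc - (c - 1)) := by omega
    rw [if_neg (show ¬ ((pr - r).natAbs > (pc - (c - 1)).natAbs) by omega)]
    simp only [if_pos hc, if_neg hd]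
    have hb : ((pc - (c - 1)).natAbs : Int) - ((pr - r).natAbs : Int) + 1
        = ((pc - c).natAbs : Int) - ((pr - r).natAbs : Int) := by omega
    rw [hb]
  · have he : (pc - (c - 1)).natAbs = (pr - r).natAbs := by omega
    rw [if_neg (by omega), if_neg (by omega)]
    have hb : ((pc - c).natAbs : Int) - ((pr - r).natAbs : Int) = 1 := by omega
    rw [hb]
    simp [PySem.List.pyRange_one_eq_nil]

-- A's loop with accumulator m computes m + B's closed-form count
lemma go_eq_core : ∀ (fuel : Nat) (grid : List String) (r c pr pc m : Int),
    (r - pr).natAbs + (c - pc).natAbs ≤ fuel →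
    checkWallsGo grid fuel r c pr pc m = m + checkWallsCore grid r c pr pc := by
  intro fuel
  induction fuel with
  | zero =>
    intro grid r c pr pc m h
    rw [checkWallsGo, core_eq_zero grid r c pr pc (by omega)]
    ring
  | succ N ih =>
    intro grid r c pr pc m h
    rw [checkWallsGo]
    by_cases hb : (r - pr).natAbs > (c - pc).natAbs
    · rw [if_pos hb]
      by_cases hs : r - pr < 0
      · rw [if_pos hs, ih grid (r + 1) c pr pc _ (by omega),
          core_step_row_up grid r c pr pc (by omega) (by omega)]
        ring
      · rw [if_neg hs, ih grid (r - 1) c pr pc _ (by omega),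
          core_step_row_down grid r c pr pc (by omega) (by omega)]
        ring
    · rw [if_neg hb]
      by_cases hb2 : (r - pr).natAbs < (c - pc).natAbs
      · rw [if_pos hb2]
        by_cases hs : c - pc < 0
        · rw [if_pos hs, ih grid r (c + 1) pr pc _ (by omega),
            core_step_col_up grid r c pr pc (by omega) (by omega)]
          ring
        · rw [if_neg hs, ih grid r (c - 1) pr pc _ (by omega),
            core_step_col_down grid r c pr pc (by omega) (by omega)]
          ring
      · rw [if_neg hb2, core_eq_zero grid r c pr pc (by omega)]
        ring

lemma loop_eq_core (grid : List String) (r c pr pc m : Int) :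
    checkWallsLoop grid r c pr pc m = m + checkWallsCore grid r c pr pc := by
  rw [checkWallsLoop]
  exact go_eq_core _ grid r c pr pc m le_rfl

-- ===== VERDICT (by name: the statement is the Claim_ definition above) =====
theorem checkWalls_spec : Claim_equal_checkWalls := by
  intro grid soundLoc playerLoc _ _
  unfold Spec_checkWalls checkWalls checkWalls_alt
  rw [loop_eq_core]
  simp
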